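-- pv_equiv track=rewrite | github.com/ReiHakiri/Learning-computation | CLTM/actions.py | add_if_variable
-- ===== SOURCE A (Python) =====
-- from itertools import product
--
-- def multi_to_state(line_n: int, intermediate: int, v_values: list[int], total_lines: int, v_bounds: list[int]) -> int:
--     result = line_n
--     radix = total_lines
--
--     result += intermediate * radix
--     radix *= 3
--
--     for v_value, v_bound in zip(v_values, v_bounds):
--         if v_value >= v_bound:
--             raise Exception('Variable value out of bounds')
--
--         result += v_value * radix
--         radix *= v_bound
--
--     return result
--
-- def all_v_values(v_bounds: list[int]) -> product:
--     result = []
--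
--     for v_bound in v_bounds:
--         result.append(range(v_bound))
--
--     return product(*result)
--
-- def add_if_variable(transition_table: list[list[int]], line_n: int, total_symbols: int, total_lines: int, v_bounds: list[int], i: int, value: int, p: int, q: int) -> list[list[tuple[int, int, int]]]:
--     if value >= v_bounds[i]:
--         raise Exception('Comparison value out of bounds')
--
--     for v_values in all_v_values(v_bounds):
--         state1 = multi_to_state(line_n, 0, v_values, total_lines, v_bounds)
--         state2 = multi_to_state(line_n, 1, v_values, total_lines, v_bounds)
--         state3 = multi_to_state(line_n + 1, 0, v_values, total_lines, v_bounds)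
--
--         state4 = multi_to_state(p - 1, 0, v_values, total_lines, v_bounds)
--         state5 = multi_to_state(p - 1, 1, v_values, total_lines, v_bounds)
--         state6 = multi_to_state(q, 0, v_values, total_lines, v_bounds)
--
--         state7 = multi_to_state(p, 0, v_values, total_lines, v_bounds)
--
--         for symbol1 in range(total_symbols):
--             for symbol2 in range(total_symbols):
--                 if v_values[i] == value:
--                     transition_table[symbol1][state1] = (symbol1, state2, 1)
--                     transition_table[symbol2][state2] = (symbol2, state3, -1)
--
--                 else:
--                     transition_table[symbol1][state1] = (symbol1, state2, 1)
--                     transition_table[symbol2][state2] = (symbol2, state7, -1)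
--
--                 transition_table[symbol1][state4] = (symbol1, state5, 1)
--                 transition_table[symbol2][state5] = (symbol2, state6, -1)
--
--     return transition_table
-- ===== SOURCE B (Python) =====
-- from itertools import product
--
-- def multi_to_state(line_n: int, intermediate: int, v_values: list[int], total_lines: int, v_bounds: list[int]) -> int:
--     result = line_n
--     radix = total_lines
--     result += intermediate * radix
--     radix *= 3
--     for v_value, v_bound in zip(v_values, v_bounds):
--         if v_value >= v_bound:
--             raise Exception('Variable value out of bounds')
--         result += v_value * radix
--         radix *= v_bound
--     return result
--
-- def all_v_values(v_bounds: list[int]) -> product: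
--     result = []
--     for v_bound in v_bounds:
--         result.append(range(v_bound))
--     return product(*result)
--
-- def _fill_row(symbol, row, specs):
--     for c1, c2, target, c4, c5, s6 in specs:
--         row[c1] = (symbol, c2, 1)
--         row[c4] = (symbol, c5, 1)
--         row[c2] = (symbol, target, -1)
--         row[c5] = (symbol, s6, -1)
--     return row
--
-- def add_if_variable(transition_table: list[list[int]], line_n: int, total_symbols: int, total_lines: int, v_bounds: list[int], i: int, value: int, p: int, q: int) -> list[list[tuple[int, int, int]]]:
--     # Inverted loop nest: precompute the per-v_values write specs once, then build
--     # the result as one comprehension over the table rows, writing each affected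
--     # row's cells exactly once (returns a new outer list over the same rows).
--     if value >= v_bounds[i]:
--         raise Exception('Comparison value out of bounds')
--
--     specs = []
--     for v_values in all_v_values(v_bounds):
--         state1 = multi_to_state(line_n, 0, v_values, total_lines, v_bounds)
--         state2 = multi_to_state(line_n, 1, v_values, total_lines, v_bounds)
--         state3 = multi_to_state(line_n + 1, 0, v_values, total_lines, v_bounds)
--         state4 = multi_to_state(p - 1, 0, v_values, total_lines, v_bounds)
--         state5 = multi_to_state(p - 1, 1, v_values, total_lines, v_bounds)
--         state6 = multi_to_state(q, 0, v_values, total_lines, v_bounds)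
--         state7 = multi_to_state(p, 0, v_values, total_lines, v_bounds)
--         target = state3 if v_values[i] == value else state7
--         specs.append((state1, state2, target, state4, state5, state6))
--
--     return [_fill_row(s, row, specs) if s < total_symbols else row
--             for s, row in enumerate(transition_table)]
-- ===== Notes on version B (the rewrite author's own statement) =====
-- stated objective: alternative
-- what changed: B inverts A's loop nest: it precomputes the per-v_values write specifications in one pass and then builds the result as a single comprehension over the table rows, writing each affected row's four cells per spec once, instead of A's v_values-outer, symbol1 x symbol2 nested in-place double loop that rewrites every cell total_symbols times; B returns a new outer list over the same row objects.
import Mathlib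
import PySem

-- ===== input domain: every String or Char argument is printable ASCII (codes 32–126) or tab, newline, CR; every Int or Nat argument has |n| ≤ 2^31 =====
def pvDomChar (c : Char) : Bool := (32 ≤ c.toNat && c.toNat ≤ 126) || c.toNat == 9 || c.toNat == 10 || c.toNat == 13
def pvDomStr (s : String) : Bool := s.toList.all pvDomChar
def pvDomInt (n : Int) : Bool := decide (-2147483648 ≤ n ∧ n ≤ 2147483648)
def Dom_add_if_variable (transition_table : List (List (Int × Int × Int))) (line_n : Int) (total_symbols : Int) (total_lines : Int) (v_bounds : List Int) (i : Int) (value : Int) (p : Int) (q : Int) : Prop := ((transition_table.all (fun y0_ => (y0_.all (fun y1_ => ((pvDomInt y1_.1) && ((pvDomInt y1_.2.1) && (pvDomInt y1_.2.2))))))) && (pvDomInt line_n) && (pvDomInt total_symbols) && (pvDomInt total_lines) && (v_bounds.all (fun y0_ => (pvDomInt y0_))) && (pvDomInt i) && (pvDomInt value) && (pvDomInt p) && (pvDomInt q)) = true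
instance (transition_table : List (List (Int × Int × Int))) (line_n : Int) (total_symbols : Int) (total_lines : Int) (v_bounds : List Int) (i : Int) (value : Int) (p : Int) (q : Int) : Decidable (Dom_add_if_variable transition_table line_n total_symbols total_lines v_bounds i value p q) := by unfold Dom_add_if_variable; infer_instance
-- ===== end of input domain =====

-- B inverts A's loop nest: it precomputes the per-v_values write specifications once and
-- then builds the result as one pass over the table rows, writing each row's cells once
-- instead of A's symbol1 × symbol2 double loop; both Pythons mutate rows in place but B
-- returns a new outer list, so the equivalence proved here is about the returned table.

-- ===== PORT A =====
def setCell (T : List (List (Int × Int × Int))) (r c : Int) (v : Int × Int × Int) : List (List (Int × Int × Int)) :=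
  PySem.List.pySetD T r (PySem.List.pySetD (PySem.List.pyGetD T r []) c v)

def multiToState (line_n intermediate : Int) (v_values : List Int) (total_lines : Int) (v_bounds : List Int) : Int :=
  ((v_values.zip v_bounds).foldl
    (fun acc vb => (acc.1 + vb.1 * acc.2, acc.2 * vb.2))
    (line_n + intermediate * total_lines, total_lines * 3)).1

def prodRanges : List (List Int) → List (List Int)
  | [] => [[]]
  | r :: rs => r.flatMap (fun x => (prodRanges rs).map (fun t => x :: t))

def allVValues (v_bounds : List Int) : List (List Int) :=
  prodRanges (v_bounds.map (fun b => PySem.List.pyRange 0 b 1))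

def add_if_variable (transition_table : List (List (Int × Int × Int))) (line_n : Int) (total_symbols : Int) (total_lines : Int) (v_bounds : List Int) (i : Int) (value : Int) (p : Int) (q : Int) : List (List (Int × Int × Int)) :=
  match PySem.List.pyGet? v_bounds i with
  | none => transition_table
  | some b =>
    if b ≤ value then transition_table
    else
      (allVValues v_bounds).foldl (fun T v_values =>
        let state1 := multiToState line_n 0 v_values total_lines v_bounds
        let state2 := multiToState line_n 1 v_values total_lines v_bounds
        let state3 := multiToState (line_n + 1) 0 v_values total_lines v_bounds
        let state4 := multiToState (p - 1) 0 v_values total_lines v_bounds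
        let state5 := multiToState (p - 1) 1 v_values total_lines v_bounds
        let state6 := multiToState q 0 v_values total_lines v_bounds
        let state7 := multiToState p 0 v_values total_lines v_bounds
        (PySem.List.pyRange 0 total_symbols 1).foldl (fun T symbol1 =>
          (PySem.List.pyRange 0 total_symbols 1).foldl (fun T symbol2 =>
            let T' :=
              if PySem.List.pyGetD v_values i 0 == value then
                setCell (setCell T symbol1 state1 (symbol1, state2, 1)) symbol2 state2 (symbol2, state3, -1)
              else
                setCell (setCell T symbol1 state1 (symbol1, state2, 1)) symbol2 state2 (symbol2, state7, -1)
            setCell (setCell T' symbol1 state4 (symbol1, state5, 1)) symbol2 state5 (symbol2, state6, -1)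
          ) T) T) transition_table

-- ===== PORT B =====
def stateSpec (line_n total_lines : Int) (v_bounds : List Int) (i value p q : Int) (v_values : List Int) : Int × Int × Int × Int × Int × Int :=
  let state1 := multiToState line_n 0 v_values total_lines v_bounds
  let state2 := multiToState line_n 1 v_values total_lines v_bounds
  let state3 := multiToState (line_n + 1) 0 v_values total_lines v_bounds
  let state4 := multiToState (p - 1) 0 v_values total_lines v_bounds
  let state5 := multiToState (p - 1) 1 v_values total_lines v_bounds
  let state6 := multiToState q 0 v_values total_lines v_bounds
  let state7 := multiToState p 0 v_values total_lines v_bounds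
  let target := if PySem.List.pyGetD v_values i 0 == value then state3 else state7
  (state1, state2, target, state4, state5, state6)

def fillRow (specs : List (Int × Int × Int × Int × Int × Int)) (symbol : Int) (row : List (Int × Int × Int)) : List (Int × Int × Int) :=
  specs.foldl (fun r sp =>
    PySem.List.pySetD
      (PySem.List.pySetD
        (PySem.List.pySetD
          (PySem.List.pySetD r sp.1 (symbol, sp.2.1, 1))
          sp.2.2.2.1 (symbol, sp.2.2.2.2.1, 1))
        sp.2.1 (symbol, sp.2.2.1, -1))
      sp.2.2.2.2.1 (symbol, sp.2.2.2.2.2, -1)) row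

def add_if_variable_alt (transition_table : List (List (Int × Int × Int))) (line_n : Int) (total_symbols : Int) (total_lines : Int) (v_bounds : List Int) (i : Int) (value : Int) (p : Int) (q : Int) : List (List (Int × Int × Int)) :=
  match PySem.List.pyGet? v_bounds i with
  | none => transition_table
  | some b =>
    if b ≤ value then transition_table
    else
      let specs := (allVValues v_bounds).map (stateSpec line_n total_lines v_bounds i value p q)
      (PySem.List.enumerate transition_table 0).map (fun sr =>
        if sr.1 < total_symbols then fillRow specs sr.1 sr.2 else sr.2)

-- ===== PRECONDITION & SPEC =====
-- Pre_ excludes the inputs on which Python A raises (index i out of range, value ≥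
-- v_bounds[i], a table with fewer than total_symbols rows or touched rows shorter than
-- the 3·total_lines·∏v_bounds state space) and the inputs outside the encoder's natural
-- domain (non-positive total_lines, line numbers line_n resp. p outside [0, total_lines)
-- resp. [1, total_lines]) on which A returns only through Python's accidental
-- negative-index wraparound or accidental collisions of state numbers.
def Pre_add_if_variable (transition_table : List (List (Int × Int × Int))) (line_n : Int) (total_symbols : Int) (total_lines : Int) (v_bounds : List Int) (i : Int) (value : Int) (p : Int) (q : Int) : Prop :=
  value < (PySem.List.pyGet? v_bounds i).getD value ∧
  ((∃ b ∈ v_bounds, b ≤ 0) ∨ total_symbols ≤ 0 ∨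
   (0 < total_lines ∧ 0 ≤ line_n ∧ line_n < total_lines ∧ 1 ≤ p ∧ p ≤ total_lines ∧
    total_symbols ≤ (transition_table.length : Int) ∧
    ∀ row ∈ transition_table.take total_symbols.toNat,
      3 * total_lines * (v_bounds.foldl (fun a b => a * b) 1) ≤ (row.length : Int)))
instance (transition_table : List (List (Int × Int × Int))) (line_n : Int) (total_symbols : Int) (total_lines : Int) (v_bounds : List Int) (i : Int) (value : Int) (p : Int) (q : Int) : Decidable (Pre_add_if_variable transition_table line_n total_symbols total_lines v_bounds i value p q) := by unfold Pre_add_if_variable; infer_instance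

def pvWitness_add_if_variable : (List (List (Int × Int × Int))) × Int × Int × Int × List Int × Int × Int × Int × Int :=
  ([[(0,0,0),(0,0,0),(0,0,0)]], 0, 1, 1, [1], 0, 0, 1, 0)

def Spec_add_if_variable (transition_table : List (List (Int × Int × Int))) (line_n : Int) (total_symbols : Int) (total_lines : Int) (v_bounds : List Int) (i : Int) (value : Int) (p : Int) (q : Int) (out : List (List (Int × Int × Int))) : Prop := out = add_if_variable_alt transition_table line_n total_symbols total_lines v_bounds i value p q
instance (transition_table : List (List (Int × Int × Int))) (line_n : Int) (total_symbols : Int) (total_lines : Int) (v_bounds : List Int) (i : Int) (value : Int) (p : Int) (q : Int) (out : List (List (Int × Int × Int))) : Decidable (Spec_add_if_variable transition_table line_n total_symbols total_lines v_bounds i value p q out) := by unfold Spec_add_if_variable; infer_instance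

-- ===== CLAIM (what is proved, stated in full; the proofs are below) =====
def Claim_equal_add_if_variable : Prop := ∀ (transition_table : List (List (Int × Int × Int))) (line_n : Int) (total_symbols : Int) (total_lines : Int) (v_bounds : List Int) (i : Int) (value : Int) (p : Int) (q : Int), Dom_add_if_variable transition_table line_n total_symbols total_lines v_bounds i value p q → Pre_add_if_variable transition_table line_n total_symbols total_lines v_bounds i value p q → Spec_add_if_variable transition_table line_n total_symbols total_lines v_bounds i value p q (add_if_variable transition_table line_n total_symbols total_lines v_bounds i value p q)

-- ===== LEMMAS AND PROOFS =====
def nsetCell (T : List (List (Int × Int × Int))) (a b : Nat) (v : Int × Int × Int) : List (List (Int × Int × Int)) :=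
  T.set a ((T.getD a []).set b v)

lemma pyGetD_nonneg {α} (xs : List α) (i : Int) (d : α) (h : 0 ≤ i) :
    PySem.List.pyGetD xs i d = xs.getD i.toNat d := by
  rw [show i = ((i.toNat : Nat) : Int) by omega, PySem.List.pyGetD_natCast, Int.toNat_natCast]

lemma setCell_nonneg (T : List (List (Int × Int × Int))) (r c : Int) (v : Int × Int × Int) (hr : 0 ≤ r) (hc : 0 ≤ c) :
    setCell T r c v = nsetCell T r.toNat c.toNat v := by
  rw [setCell, PySem.List.pySetD_of_nonneg _ _ hr, PySem.List.pySetD_of_nonneg _ _ hc,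
    pyGetD_nonneg _ _ _ hr, nsetCell]

lemma getD_set_ne (l : List (List (Int × Int × Int))) (a b : Nat) (x d) (h : a ≠ b) : (l.set a x).getD b d = l.getD b d := by
  simp [List.getD_eq_getElem?_getD, List.getElem?_set_ne h]

lemma getD_set_self (l : List (List (Int × Int × Int))) (a : Nat) (x d) (h : a < l.length) : (l.set a x).getD a d = x := by
  simp [List.getD_eq_getElem?_getD, h]

lemma nsetCell_oob (T : List (List (Int × Int × Int))) (a b : Nat) (v : Int × Int × Int) (h : T.length ≤ a) :
    nsetCell T a b v = T := by
  rw [nsetCell, List.set_eq_of_length_le h]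

lemma nsetCell_comm (T : List (List (Int × Int × Int))) (a b a' b' : Nat) (v v' : Int × Int × Int) (hne : a ≠ a' ∨ b ≠ b') :
    nsetCell (nsetCell T a b v) a' b' v' = nsetCell (nsetCell T a' b' v') a b v := by
  by_cases haa : a = a'
  · subst haa
    rcases hne with h | h
    · exact absurd rfl h
    · by_cases hlt : a < T.length
      · simp only [nsetCell]
        rw [getD_set_self _ _ _ _ hlt, getD_set_self _ _ _ _ hlt,
          List.set_set, List.set_set, List.set_comm _ _ h]
      · have hle : T.length ≤ a := by omega
        rw [nsetCell_oob T a b v hle, nsetCell_oob T a b' v' hle, nsetCell_oob T a b v hle]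
  · simp only [nsetCell]
    rw [getD_set_ne _ _ _ _ _ haa, getD_set_ne _ _ _ _ _ (Ne.symm haa), List.set_comm _ _ haa]

lemma nsetCell_over (T : List (List (Int × Int × Int))) (a b : Nat) (v v' : Int × Int × Int) :
    nsetCell (nsetCell T a b v) a b v' = nsetCell T a b v' := by
  by_cases hlt : a < T.length
  · simp only [nsetCell]
    rw [getD_set_self _ _ _ _ hlt, List.set_set, List.set_set]
  · have hle : T.length ≤ a := by omega
    rw [nsetCell_oob T a b v hle, nsetCell_oob T a b v' hle]

lemma setCell_comm (T : List (List (Int × Int × Int))) (r c r' c' : Int)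
    (v v' : Int × Int × Int) (hr : 0 ≤ r) (hc : 0 ≤ c) (hr' : 0 ≤ r') (hc' : 0 ≤ c')
    (hne : r ≠ r' ∨ c ≠ c') :
    setCell (setCell T r c v) r' c' v' = setCell (setCell T r' c' v') r c v := by
  rw [setCell_nonneg T r c v hr hc, setCell_nonneg T r' c' v' hr' hc',
      setCell_nonneg _ r' c' v' hr' hc', setCell_nonneg _ r c v hr hc]
  exact nsetCell_comm T _ _ _ _ v v' (by omega)

lemma setCell_over (T : List (List (Int × Int × Int))) (r c : Int) (v v' : Int × Int × Int) (hr : 0 ≤ r) (hc : 0 ≤ c) :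
    setCell (setCell T r c v) r c v' = setCell T r c v' := by
  rw [setCell_nonneg T r c v hr hc, setCell_nonneg _ r c v' hr hc,
      setCell_nonneg T r c v' hr hc]
  exact nsetCell_over T _ _ v v'

def kOp (c1 c2 c4 c5 s : Int) (T : List (List (Int × Int × Int))) : List (List (Int × Int × Int)) :=
  setCell (setCell T s c1 (s, c2, 1)) s c4 (s, c5, 1)

def hOp (c2 c5 tgt s6 s : Int) (T : List (List (Int × Int × Int))) : List (List (Int × Int × Int)) :=
  setCell (setCell T s c2 (s, tgt, -1)) s c5 (s, s6, -1)

-- push one write pair past another when all four cross cells differ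
lemma setCell_pair_comm (T : List (List (Int × Int × Int))) (ra ca rb cb rc cc rd cd : Int)
    (va vb vc vd : Int × Int × Int)
    (ha : 0 ≤ ra) (hca : 0 ≤ ca) (hb : 0 ≤ rb) (hcb : 0 ≤ cb)
    (hc : 0 ≤ rc) (hcc : 0 ≤ cc) (hd : 0 ≤ rd) (hcd : 0 ≤ cd)
    (hac : ra ≠ rc ∨ ca ≠ cc) (had : ra ≠ rd ∨ ca ≠ cd)
    (hbc : rb ≠ rc ∨ cb ≠ cc) (hbd : rb ≠ rd ∨ cb ≠ cd) :
    setCell (setCell (setCell (setCell T rc cc vc) rd cd vd) ra ca va) rb cb vb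
      = setCell (setCell (setCell (setCell T ra ca va) rb cb vb) rc cc vc) rd cd vd := by
  rw [setCell_comm (setCell T rc cc vc) rd cd ra ca vd va hd hcd ha hca
        (by rcases had with h | h; exact Or.inl (Ne.symm h); exact Or.inr (Ne.symm h)),
      setCell_comm T rc cc ra ca vc va hc hcc ha hca
        (by rcases hac with h | h; exact Or.inl (Ne.symm h); exact Or.inr (Ne.symm h)),
      setCell_comm (setCell (setCell T ra ca va) rc cc vc) rd cd rb cb vd vb hd hcd hb hcb
        (by rcases hbd with h | h; exact Or.inl (Ne.symm h); exact Or.inr (Ne.symm h)),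
      setCell_comm (setCell T ra ca va) rc cc rb cb vc vb hc hcc hb hcb
        (by rcases hbc with h | h; exact Or.inl (Ne.symm h); exact Or.inr (Ne.symm h))]

lemma kOp_hOp_comm (c1 c2 c4 c5 tgt s6 s t : Int)
    (hc1 : 0 ≤ c1) (hc2 : 0 ≤ c2) (hc4 : 0 ≤ c4) (hc5 : 0 ≤ c5)
    (h12 : c1 ≠ c2) (h15 : c1 ≠ c5) (h42 : c4 ≠ c2) (h45 : c4 ≠ c5)
    (hs : 0 ≤ s) (ht : 0 ≤ t) (T : List (List (Int × Int × Int))) :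
    kOp c1 c2 c4 c5 s (hOp c2 c5 tgt s6 t T) = hOp c2 c5 tgt s6 t (kOp c1 c2 c4 c5 s T) := by
  simp only [kOp, hOp]
  exact setCell_pair_comm T s c1 s c4 t c2 t c5 _ _ _ _ hs hc1 hs hc4 ht hc2 ht hc5
    (Or.inr h12) (Or.inr h15) (Or.inr h42) (Or.inr h45)

lemma hOp_hOp_comm (c2 c5 tgt s6 s t : Int) (hc2 : 0 ≤ c2) (hc5 : 0 ≤ c5)
    (hs : 0 ≤ s) (ht : 0 ≤ t) (hst : s ≠ t) (T : List (List (Int × Int × Int))) :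
    hOp c2 c5 tgt s6 s (hOp c2 c5 tgt s6 t T) = hOp c2 c5 tgt s6 t (hOp c2 c5 tgt s6 s T) := by
  simp only [hOp]
  exact setCell_pair_comm T s c2 s c5 t c2 t c5 _ _ _ _ hs hc2 hs hc5 ht hc2 ht hc5
    (Or.inl hst) (Or.inl hst) (Or.inl hst) (Or.inl hst)

lemma kOp_idem (c1 c2 c4 c5 s : Int)
    (hc1 : 0 ≤ c1) (hc4 : 0 ≤ c4) (hs : 0 ≤ s) (h14 : c1 = c4 → c2 = c5)
    (T : List (List (Int × Int × Int))) :
    kOp c1 c2 c4 c5 s (kOp c1 c2 c4 c5 s T) = kOp c1 c2 c4 c5 s T := by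
  simp only [kOp]
  by_cases h : c1 = c4
  · rw [h, h14 h]
    rw [setCell_over T s c4 _ _ hs hc4, setCell_over T s c4 _ _ hs hc4,
        setCell_over T s c4 _ _ hs hc4]
  · rw [setCell_comm (setCell T s c1 _) s c4 s c1 _ _ hs hc4 hs hc1 (Or.inr (Ne.symm h)),
        setCell_over T s c1 _ _ hs hc1,
        setCell_over (setCell T s c1 _) s c4 _ _ hs hc4]

lemma hOp_idem (c2 c5 tgt s6 s : Int) (hc2 : 0 ≤ c2) (hc5 : 0 ≤ c5) (hs : 0 ≤ s)
    (T : List (List (Int × Int × Int))) :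
    hOp c2 c5 tgt s6 s (hOp c2 c5 tgt s6 s T) = hOp c2 c5 tgt s6 s T := by
  simp only [hOp]
  by_cases h : c2 = c5
  · rw [← h]
    rw [setCell_over T s c2 _ _ hs hc2, setCell_over T s c2 _ _ hs hc2,
        setCell_over T s c2 _ _ hs hc2]
  · rw [setCell_comm (setCell T s c2 _) s c5 s c2 _ _ hs hc5 hs hc2 (Or.inr (Ne.symm h)),
        setCell_over T s c2 _ _ hs hc2,
        setCell_over (setCell T s c2 _) s c5 _ _ hs hc5]

lemma foldl_push {α : Type} (f : α → List (List (Int × Int × Int)) → List (List (Int × Int × Int)))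
    (φ : List (List (Int × Int × Int)) → List (List (Int × Int × Int))) :
    ∀ (L : List α) (T : List (List (Int × Int × Int))), (∀ s ∈ L, ∀ X, f s (φ X) = φ (f s X)) →
      L.foldl (fun T s => f s T) (φ T) = φ (L.foldl (fun T s => f s T) T) := by
  intro L
  induction L with
  | nil => intro T h; rfl
  | cons a L ih =>
    intro T h
    simp only [List.foldl_cons]
    rw [h a (by simp) T]
    exact ih (f a T) (fun s hs X => h s (by simp [hs]) X)

lemma foldl_inner_collapse (f : Int → List (List (Int × Int × Int)) → List (List (Int × Int × Int)))
    (kk : List (List (Int × Int × Int)) → List (List (Int × Int × Int)))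
    (hidem : ∀ X, kk (kk X) = kk X) :
    ∀ (L : List Int) (T : List (List (Int × Int × Int))), L ≠ [] → (∀ s ∈ L, ∀ X, f s (kk X) = kk (f s X)) →
      L.foldl (fun T s => f s (kk T)) T = L.foldl (fun T s => f s T) (kk T) := by
  intro L
  induction L with
  | nil => intro T hne _; exact absurd rfl hne
  | cons a L ih =>
    intro T _ hcomm
    rcases eq_or_ne L [] with hL | hL
    · subst hL; rfl
    · simp only [List.foldl_cons]
      rw [ih (f a (kk T)) hL (fun s hs X => hcomm s (by simp [hs]) X)]
      congr 1
      rw [← hcomm a (by simp) (kk T), hidem T]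

lemma foldl_idem (f : Int → List (List (Int × Int × Int)) → List (List (Int × Int × Int))) :
    ∀ (L : List Int), L.Nodup → (∀ s ∈ L, ∀ X, f s (f s X) = f s X) →
      (∀ s ∈ L, ∀ t ∈ L, s ≠ t → ∀ X, f s (f t X) = f t (f s X)) →
      ∀ T, L.foldl (fun T s => f s T) (L.foldl (fun T s => f s T) T) = L.foldl (fun T s => f s T) T := by
  intro L
  induction L with
  | nil => intro _ _ _ T; rfl
  | cons a L ih =>
    intro hnd hid hcm T
    have hna : a ∉ L := (List.nodup_cons.mp hnd).1
    have hndL : L.Nodup := (List.nodup_cons.mp hnd).2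
    simp only [List.foldl_cons]
    have hpush : ∀ X, f a (L.foldl (fun T s => f s T) X) = L.foldl (fun T s => f s T) (f a X) := by
      intro X
      rw [foldl_push f (f a) L X (fun t htL Y =>
        hcm t (by simp [htL]) a (by simp) (fun hta => hna (hta ▸ htL)) Y)]
    rw [hpush (f a T), hid a (by simp) T]
    exact ih hndL (fun s hs X => hid s (by simp [hs]) X)
      (fun s hs t ht hne X => hcm s (by simp [hs]) t (by simp [ht]) hne X) (f a T)

lemma foldl_outer (g : Int → List (List (Int × Int × Int)) → List (List (Int × Int × Int)))
    (H : List (List (Int × Int × Int)) → List (List (Int × Int × Int))) :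
    ∀ (L : List Int) (T : List (List (Int × Int × Int))), L ≠ [] → (∀ X, H (H X) = H X) →
      (∀ s ∈ L, ∀ X, g s (H X) = H (g s X)) →
      L.foldl (fun T s => H (g s T)) T = H (L.foldl (fun T s => g s T) T) := by
  intro L
  induction L with
  | nil => intro T hne _ _; exact absurd rfl hne
  | cons a L ih =>
    intro T _ hHH hgH
    rcases eq_or_ne L [] with hL | hL
    · subst hL; rfl
    · simp only [List.foldl_cons]
      rw [ih (H (g a T)) hL hHH (fun s hs X => hgH s (by simp [hs]) X)]
      rw [foldl_push g H L (g a T) (fun s hs X => hgH s (by simp [hs]) X)]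
      rw [hHH]

lemma foldl_bside (f g : Int → List (List (Int × Int × Int)) → List (List (Int × Int × Int))) :
    ∀ (L : List Int) (T : List (List (Int × Int × Int))), (∀ s ∈ L, ∀ t ∈ L, ∀ X, f s (g t X) = g t (f s X)) →
      L.foldl (fun T s => f s (g s T)) T
        = L.foldl (fun T t => f t T) (L.foldl (fun T s => g s T) T) := by
  intro L
  induction L with
  | nil => intro T _; rfl
  | cons a L ih =>
    intro T hcm
    simp only [List.foldl_cons]
    rw [ih (f a (g a T)) (fun s hs t ht X => hcm s (by simp [hs]) t (by simp [ht]) X)]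
    congr 1
    rw [foldl_push g (f a) L (g a T) (fun t ht X => (hcm a (by simp) t (by simp [ht]) X).symm)]

lemma nested_eq_single (c1 c2 c4 c5 tgt s6 : Int)
    (hc1 : 0 ≤ c1) (hc2 : 0 ≤ c2) (hc4 : 0 ≤ c4) (hc5 : 0 ≤ c5)
    (h12 : c1 ≠ c2) (h15 : c1 ≠ c5) (h42 : c4 ≠ c2) (h45 : c4 ≠ c5)
    (h14 : c1 = c4 → c2 = c5) (N : Int) (T : List (List (Int × Int × Int))) :
    (PySem.List.pyRange 0 N 1).foldl (fun T s1 =>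
       (PySem.List.pyRange 0 N 1).foldl (fun T s2 =>
          setCell (setCell (setCell (setCell T s1 c1 (s1, c2, 1)) s2 c2 (s2, tgt, -1))
            s1 c4 (s1, c5, 1)) s2 c5 (s2, s6, -1)) T) T
    = (PySem.List.pyRange 0 N 1).foldl (fun T s =>
          setCell (setCell (setCell (setCell T s c1 (s, c2, 1)) s c4 (s, c5, 1))
            s c2 (s, tgt, -1)) s c5 (s, s6, -1)) T := by
  set L := PySem.List.pyRange 0 N 1 with hLdef
  have hpos : ∀ s ∈ L, 0 ≤ s := by
    intro s hs
    exact ((PySem.List.mem_pyRange_one).mp (hLdef ▸ hs)).1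
  have hnd : L.Nodup := hLdef ▸ PySem.List.nodup_pyRange_one 0 N
  have hkh : ∀ s t : Int, 0 ≤ s → 0 ≤ t → ∀ X,
      kOp c1 c2 c4 c5 s (hOp c2 c5 tgt s6 t X) = hOp c2 c5 tgt s6 t (kOp c1 c2 c4 c5 s X) :=
    fun s t hs ht X => kOp_hOp_comm c1 c2 c4 c5 tgt s6 s t hc1 hc2 hc4 hc5 h12 h15 h42 h45 hs ht X
  have stepA : L.foldl (fun T s1 =>
       L.foldl (fun T s2 =>
          setCell (setCell (setCell (setCell T s1 c1 (s1, c2, 1)) s2 c2 (s2, tgt, -1))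
            s1 c4 (s1, c5, 1)) s2 c5 (s2, s6, -1)) T) T
      = L.foldl (fun T s1 => L.foldl (fun T s2 =>
          hOp c2 c5 tgt s6 s2 (kOp c1 c2 c4 c5 s1 T)) T) T := by
    apply PySem.List.foldl_congr_mem
    intro acc s1 hs1
    apply PySem.List.foldl_congr_mem
    intro acc2 s2 hs2
    simp only [hOp, kOp]
    rw [setCell_comm (setCell acc2 s1 c1 (s1, c2, 1)) s2 c2 s1 c4 _ _
        (hpos s2 hs2) hc2 (hpos s1 hs1) hc4 (Or.inr (Ne.symm h42))]
  rw [stepA]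
  have stepB : (L.foldl (fun T s =>
          setCell (setCell (setCell (setCell T s c1 (s, c2, 1)) s c4 (s, c5, 1))
            s c2 (s, tgt, -1)) s c5 (s, s6, -1)) T)
      = L.foldl (fun T s => hOp c2 c5 tgt s6 s (kOp c1 c2 c4 c5 s T)) T := rfl
  rw [stepB]
  rcases eq_or_ne L [] with hL | hL
  · rw [hL]; rfl
  · have step2 : L.foldl (fun T s1 => L.foldl (fun T s2 =>
          hOp c2 c5 tgt s6 s2 (kOp c1 c2 c4 c5 s1 T)) T) T
        = L.foldl (fun T s1 => L.foldl (fun T s2 =>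
          hOp c2 c5 tgt s6 s2 T) (kOp c1 c2 c4 c5 s1 T)) T := by
      apply PySem.List.foldl_congr_mem
      intro acc s1 hs1
      exact foldl_inner_collapse (hOp c2 c5 tgt s6) (kOp c1 c2 c4 c5 s1)
        (fun X => kOp_idem c1 c2 c4 c5 s1 hc1 hc4 (hpos s1 hs1) h14 X) L acc hL
        (fun s hs X => (hkh s1 s (hpos s1 hs1) (hpos s hs) X).symm)
    rw [step2]
    have hHH : ∀ X, L.foldl (fun T t => hOp c2 c5 tgt s6 t T)
        (L.foldl (fun T t => hOp c2 c5 tgt s6 t T) X) = L.foldl (fun T t => hOp c2 c5 tgt s6 t T) X :=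
      foldl_idem (hOp c2 c5 tgt s6) L hnd
        (fun s hs X => hOp_idem c2 c5 tgt s6 s hc2 hc5 (hpos s hs) X)
        (fun s hs t ht hne X => hOp_hOp_comm c2 c5 tgt s6 s t hc2 hc5 (hpos s hs) (hpos t ht) hne X)
    rw [foldl_outer (kOp c1 c2 c4 c5) (fun X => L.foldl (fun T t => hOp c2 c5 tgt s6 t T) X) L T hL hHH
        (fun s hs X => by
          rw [← foldl_push (hOp c2 c5 tgt s6) (kOp c1 c2 c4 c5 s) L X
            (fun t ht Y => (hkh s t (hpos s hs) (hpos t ht) Y).symm)])]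
    rw [foldl_bside (hOp c2 c5 tgt s6) (kOp c1 c2 c4 c5) L T
        (fun s hs t ht X => (hkh t s (hpos t ht) (hpos s hs) X).symm)]

lemma fst_foldl_add (l : List (Int × Int)) :
    ∀ (x y r : Int), (l.foldl (fun acc vb => (acc.1 + vb.1 * acc.2, acc.2 * vb.2)) (x + y, r)).1
      = x + (l.foldl (fun acc vb => (acc.1 + vb.1 * acc.2, acc.2 * vb.2)) (y, r)).1 := by
  induction l with
  | nil => intro x y r; rfl
  | cons a l ih =>
    intro x y r
    simp only [List.foldl_cons]
    rw [show x + y + a.1 * r = x + (y + a.1 * r) by ring]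
    exact ih x (y + a.1 * r) (r * a.2)

lemma multiToState_shift (line_n intermediate : Int) (v : List Int) (TL : Int) (vb : List Int) :
    multiToState line_n intermediate v TL vb
      = line_n + intermediate * TL + multiToState 0 0 v TL vb := by
  simp only [multiToState]
  rw [show line_n + intermediate * TL = (line_n + intermediate * TL) + 0 by ring,
    fst_foldl_add]
  norm_num

lemma snd_radix_nonneg (l : List (Int × Int)) :
    ∀ (y r : Int), (∀ pr ∈ l, 0 ≤ pr.1 ∧ 0 ≤ pr.2) → 0 ≤ y → 0 ≤ r →
      0 ≤ (l.foldl (fun acc vb => (acc.1 + vb.1 * acc.2, acc.2 * vb.2)) (y, r)).1 := by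
  induction l with
  | nil => intro y r _ hy _; exact hy
  | cons a l ih =>
    intro y r hmem hy hr
    simp only [List.foldl_cons]
    have ha := hmem a (by simp)
    exact ih (y + a.1 * r) (r * a.2) (fun pr hpr => hmem pr (by simp [hpr]))
      (add_nonneg hy (mul_nonneg ha.1 hr)) (mul_nonneg hr ha.2)

lemma multiToState_zero_nonneg (v : List Int) (TL : Int) (vb : List Int)
    (hTL : 0 < TL) (h : ∀ pr ∈ v.zip vb, 0 ≤ pr.1 ∧ pr.1 < pr.2) :
    0 ≤ multiToState 0 0 v TL vb := by
  simp only [multiToState]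
  apply snd_radix_nonneg
  · intro pr hpr
    have := h pr hpr
    omega
  · norm_num
  · positivity

lemma mem_prodRanges (rs : List (List Int)) (v : List Int) (h : v ∈ prodRanges rs) :
    List.Forall₂ (fun x r => x ∈ r) v rs := by
  induction rs generalizing v with
  | nil => simp [prodRanges] at h; subst h; exact List.Forall₂.nil
  | cons r rs ih =>
    simp only [prodRanges, List.mem_flatMap, List.mem_map] at h
    obtain ⟨x, hx, t, ht, rfl⟩ := h
    exact List.Forall₂.cons hx (ih t ht)

lemma mem_allVValues (v_bounds v : List Int) (h : v ∈ allVValues v_bounds) :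
    List.Forall₂ (fun x b => 0 ≤ x ∧ x < b) v v_bounds := by
  have h2 := mem_prodRanges _ v h
  have h3 := List.forall₂_map_right_iff.mp h2
  exact h3.imp (fun {x b} hx => by
    have := PySem.List.mem_pyRange_one.mp hx
    omega)

lemma allVValues_empty (v_bounds : List Int) (h : ∃ b ∈ v_bounds, b ≤ 0) :
    allVValues v_bounds = [] := by
  obtain ⟨b, hb, hb0⟩ := h
  unfold allVValues
  induction v_bounds with
  | nil => simp at hb
  | cons c cs ih =>
    simp only [List.map_cons, prodRanges]
    rcases List.mem_cons.mp hb with rfl | hmem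
    · rw [PySem.List.pyRange_one_eq_nil (by omega)]
      rfl
    · rw [ih hmem]
      simp

lemma prodRanges_ne_nil : ∀ rs : List (List Int), (∀ r ∈ rs, r ≠ []) → prodRanges rs ≠ [] := by
  intro rs
  induction rs with
  | nil => intro _; simp [prodRanges]
  | cons r rs ih =>
    intro h hnil
    simp only [prodRanges] at hnil
    rw [List.flatMap_eq_nil_iff] at hnil
    rcases hr : r with _ | ⟨x, r'⟩
    · exact h r (by simp) hr
    · have := hnil x (by rw [hr]; simp)
      rw [List.map_eq_nil_iff] at this
      exact ih (fun r hrr => h r (by simp [hrr])) this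

lemma allVValues_ne_nil (v_bounds : List Int) (h : ∀ b ∈ v_bounds, 0 < b) :
    allVValues v_bounds ≠ [] := by
  unfold allVValues
  apply prodRanges_ne_nil
  intro r hr
  rw [List.mem_map] at hr
  obtain ⟨b, hb, rfl⟩ := hr
  rw [PySem.List.pyRange_one_cons (by have := h b hb; omega)]
  simp

-- row-update view: one functional write to a single row of the table
def sRow (a : Nat) (F : List (Int × Int × Int) → List (Int × Int × Int))
    (T : List (List (Int × Int × Int))) : List (List (Int × Int × Int)) :=
  T.set a (F (T.getD a []))

lemma sRow_sRow (a : Nat) (F G : List (Int × Int × Int) → List (Int × Int × Int))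
    (T : List (List (Int × Int × Int))) :
    sRow a F (sRow a G T) = sRow a (fun r => F (G r)) T := by
  by_cases h : a < T.length
  · simp only [sRow]
    rw [getD_set_self _ _ _ _ h, List.set_set]
  · have hle : T.length ≤ a := Nat.le_of_not_lt h
    simp only [sRow]
    rw [List.set_eq_of_length_le hle, List.set_eq_of_length_le hle, List.set_eq_of_length_le hle]

lemma sRow_comm (a b : Nat) (F G : List (Int × Int × Int) → List (Int × Int × Int))
    (h : a ≠ b) (T : List (List (Int × Int × Int))) :
    sRow a F (sRow b G T) = sRow b G (sRow a F T) := by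
  simp only [sRow]
  rw [getD_set_ne _ _ _ _ _ (Ne.symm h), getD_set_ne _ _ _ _ _ h, List.set_comm _ _ h]

-- the four writes B performs on one row, as a row function
def rowWr (c1 c2 tgt c4 c5 s6 : Int) (j : Nat) (r : List (Int × Int × Int)) : List (Int × Int × Int) :=
  (((r.set c1.toNat ((j : Int), c2, 1)).set c4.toNat ((j : Int), c5, 1)).set c2.toNat
      ((j : Int), tgt, -1)).set c5.toNat ((j : Int), s6, -1)

def rowSp (sp : Int × Int × Int × Int × Int × Int) (j : Nat) (r : List (Int × Int × Int)) : List (Int × Int × Int) :=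
  rowWr sp.1 sp.2.1 sp.2.2.1 sp.2.2.2.1 sp.2.2.2.2.1 sp.2.2.2.2.2 j r

lemma quad_row (T : List (List (Int × Int × Int))) (s c1 c2 tgt c4 c5 s6 : Int)
    (hs : 0 ≤ s) (h1 : 0 ≤ c1) (h2 : 0 ≤ c2) (h4 : 0 ≤ c4) (h5 : 0 ≤ c5) :
    setCell (setCell (setCell (setCell T s c1 (s, c2, 1)) s c4 (s, c5, 1)) s c2 (s, tgt, -1)) s c5 (s, s6, -1)
      = sRow s.toNat (rowWr c1 c2 tgt c4 c5 s6 s.toNat) T := by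
  rw [setCell_nonneg T s c1 _ hs h1, setCell_nonneg _ s c4 _ hs h4,
      setCell_nonneg _ s c2 _ hs h2, setCell_nonneg _ s c5 _ hs h5]
  simp only [show ∀ (X : List (List (Int × Int × Int))) (a b : Nat) (v : Int × Int × Int),
      nsetCell X a b v = sRow a (fun r => r.set b v) X from fun _ _ _ _ => rfl]
  rw [sRow_sRow, sRow_sRow, sRow_sRow]
  congr 1
  funext r
  simp only [rowWr, Int.toNat_of_nonneg hs]

lemma foldl_fuse (G H : Int → List (List (Int × Int × Int)) → List (List (Int × Int × Int))) :
    ∀ (L : List Int), L.Nodup →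
      (∀ s ∈ L, ∀ t ∈ L, s ≠ t → ∀ X, G s (H t X) = H t (G s X)) →
      ∀ T, L.foldl (fun T s => G s T) (L.foldl (fun T s => H s T) T)
            = L.foldl (fun T s => G s (H s T)) T := by
  intro L
  induction L with
  | nil => intro _ _ T; rfl
  | cons a L ih =>
    intro hnd hcm T
    have hna : a ∉ L := (List.nodup_cons.mp hnd).1
    simp only [List.foldl_cons]
    rw [← foldl_push H (G a) L (H a T)
        (fun t ht X => (hcm a (by simp) t (by simp [ht]) (fun he => hna (he ▸ ht)) X).symm)]
    exact ih (List.nodup_cons.mp hnd).2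
      (fun s hs t ht hne X => hcm s (by simp [hs]) t (by simp [ht]) hne X) (G a (H a T))

lemma foldl_interchange {α : Type} (W : α → Int → List (List (Int × Int × Int)) → List (List (Int × Int × Int))) :
    ∀ (Vs : List α) (S : List Int),
      (∀ v ∈ Vs, ∀ v' ∈ Vs, ∀ s ∈ S, ∀ t ∈ S, s ≠ t → ∀ X, W v s (W v' t X) = W v' t (W v s X)) →
      S.Nodup →
      ∀ T, Vs.foldl (fun T v => S.foldl (fun T s => W v s T) T) T
          = S.foldl (fun T s => Vs.foldl (fun T v => W v s T) T) T := by
  intro Vs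
  induction Vs with
  | nil =>
    intro S _ _ T
    simp only [List.foldl_nil]
    exact (PySem.List.foldl_ignore S T).symm
  | cons v Vs ih =>
    intro S hcm hnd T
    simp only [List.foldl_cons]
    rw [ih S (fun a ha b hb s hs t ht hne X =>
          hcm a (by simp [ha]) b (by simp [hb]) s hs t ht hne X) hnd (S.foldl (fun T s => W v s T) T)]
    rw [foldl_fuse (fun s T => Vs.foldl (fun T v' => W v' s T) T) (W v) S hnd
        (fun s hs t ht hne X =>
          foldl_push (fun v' T => W v' s T) (W v t) Vs X
            (fun v' hv' Y => hcm v' (by simp [hv']) v (by simp) s hs t ht hne Y)) T]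

lemma foldl_sRow {α : Type} (a : Nat) (F : α → List (Int × Int × Int) → List (Int × Int × Int)) :
    ∀ (Vs : List α) (T : List (List (Int × Int × Int))), Vs ≠ [] →
      Vs.foldl (fun T v => sRow a (F v) T) T
        = sRow a (fun r => Vs.foldl (fun r v => F v r) r) T := by
  intro Vs
  induction Vs with
  | nil => intro T h; exact absurd rfl h
  | cons v Vs ih =>
    intro T _
    rcases eq_or_ne Vs [] with hV | hV
    · subst hV; rfl
    · simp only [List.foldl_cons]
      rw [ih (sRow a (F v) T) hV, sRow_sRow]

lemma foldl_sRow_range_getElem? (N : Int) (F : Nat → List (Int × Int × Int) → List (Int × Int × Int)) :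
    ∀ (n : Nat) (a : Int) (T : List (List (Int × Int × Int))) (j : Nat), 0 ≤ a → (N - a).toNat = n →
      ((PySem.List.pyRange a N 1).foldl (fun T s => sRow s.toNat (F s.toNat) T) T)[j]?
        = if a ≤ (j : Int) ∧ (j : Int) < N then T[j]?.map (F j) else T[j]? := by
  intro n
  induction n with
  | zero =>
    intro a T j ha hn
    rw [PySem.List.pyRange_one_eq_nil (by omega : N ≤ a)]
    simp only [List.foldl_nil]
    rw [if_neg (by omega)]
  | succ n ih =>
    intro a T j ha hn
    have haN : a < N := by omega
    rw [PySem.List.pyRange_one_cons haN]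
    simp only [List.foldl_cons]
    rw [ih (a + 1) _ j (by omega) (by omega)]
    by_cases hj : (j : Int) = a
    · rw [if_neg (by omega), if_pos (by omega)]
      have hja : j = a.toNat := by omega
      subst hja
      simp only [sRow, List.getElem?_set, if_true]
      by_cases hlen : a.toNat < T.length
      · rw [if_pos hlen, List.getD_eq_getElem?_getD, List.getElem?_eq_getElem hlen]
        rfl
      · rw [if_neg hlen, List.getElem?_eq_none (by omega)]
        rfl
    · have hja : j ≠ a.toNat := by omega
      simp only [sRow]
      rw [List.getElem?_set_ne (fun he => hja he.symm)]
      by_cases hc : a ≤ (j : Int) ∧ (j : Int) < N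
      · rw [if_pos (by omega), if_pos hc]
      · rw [if_neg (by omega), if_neg hc]

lemma range_eq_enumMap (N : Int) (F : Nat → List (Int × Int × Int) → List (Int × Int × Int))
    (T : List (List (Int × Int × Int))) :
    (PySem.List.pyRange 0 N 1).foldl (fun T s => sRow s.toNat (F s.toNat) T) T
      = (PySem.List.enumerate T 0).map (fun sr => if sr.1 < N then F sr.1.toNat sr.2 else sr.2) := by
  apply List.ext_getElem?
  intro j
  rw [foldl_sRow_range_getElem? N F (N - 0).toNat 0 T j le_rfl rfl,
      List.getElem?_map, PySem.List.getElem?_enumerate]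
  cases hT : T[j]? with
  | none => simp
  | some r =>
    simp only [Option.map_some, zero_add, Int.toNat_natCast]
    by_cases hc : (j : Int) < N
    · rw [if_pos (by omega), if_pos hc]
    · rw [if_neg (by omega), if_neg hc]

lemma main_eq (transition_table : List (List (Int × Int × Int))) (line_n total_symbols total_lines : Int)
    (v_bounds : List Int) (i value p q : Int)
    (hval : value < (PySem.List.pyGet? v_bounds i).getD value)
    (hrest : (∃ b ∈ v_bounds, b ≤ 0) ∨ total_symbols ≤ 0 ∨
      (0 < total_lines ∧ 0 ≤ line_n ∧ line_n < total_lines ∧ 1 ≤ p ∧ p ≤ total_lines ∧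
       total_symbols ≤ (transition_table.length : Int) ∧
       ∀ row ∈ transition_table.take total_symbols.toNat,
         3 * total_lines * (v_bounds.foldl (fun a b => a * b) 1) ≤ (row.length : Int))) :
    add_if_variable transition_table line_n total_symbols total_lines v_bounds i value p q
      = add_if_variable_alt transition_table line_n total_symbols total_lines v_bounds i value p q := by
  cases hb : PySem.List.pyGet? v_bounds i with
  | none => rw [hb] at hval; simp at hval
  | some b =>
    rw [hb] at hval
    simp only [Option.getD_some] at hval
    unfold add_if_variable add_if_variable_alt
    rw [hb]
    simp only [if_neg (by omega : ¬ b ≤ value)]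
    by_cases hemp : ∃ b' ∈ v_bounds, b' ≤ 0
    · -- no variable assignments at all: A leaves the table, B rebuilds it unchanged
      rw [allVValues_empty v_bounds hemp]
      simp only [List.map_nil, List.foldl_nil, fillRow, ite_self]
      exact (PySem.List.map_snd_enumerate transition_table 0).symm
    · push Not at hemp
      by_cases hts : total_symbols ≤ 0
      · -- no symbols: A's inner loops are empty, B's row guard never fires
        calc _ = (allVValues v_bounds).foldl (fun T _ => T) transition_table := by
                apply PySem.List.foldl_congr_mem
                intro acc v _
                simp [PySem.List.pyRange_one_eq_nil hts]
          _ = transition_table := PySem.List.foldl_ignore _ _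
          _ = (PySem.List.enumerate transition_table 0).map (fun sr => sr.2) :=
                (PySem.List.map_snd_enumerate transition_table 0).symm
          _ = _ := List.map_congr_left (fun sr hsr => by
                obtain ⟨k, hk, rfl⟩ := (PySem.List.mem_enumerate_iff _ _ _).mp hsr
                exact (if_neg (by omega)).symm)
      · have hB : 0 < total_lines ∧ 0 ≤ line_n ∧ line_n < total_lines ∧ 1 ≤ p ∧ p ≤ total_lines := by
          rcases hrest with h | h | h
          · obtain ⟨b', hb', hb0⟩ := h; exact absurd hb0 (by have := hemp b' hb'; omega)
          · exact absurd h hts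
          · exact ⟨h.1, h.2.1, h.2.2.1, h.2.2.2.1, h.2.2.2.2.1⟩
        obtain ⟨hTL, hln0, hlnTL, hp1, hpTL⟩ := hB
        have hVs : allVValues v_bounds ≠ [] := allVValues_ne_nil v_bounds hemp
        have hSnn : ∀ v ∈ allVValues v_bounds, 0 ≤ multiToState 0 0 v total_lines v_bounds := by
          intro v hv
          apply multiToState_zero_nonneg _ _ _ hTL
          intro pr hpr
          exact List.forall₂_zip (mem_allVValues v_bounds v hv) (by exact hpr)
        -- Step I: per v_values, A's nested double loop collapses to per-row writes
        trans ((allVValues v_bounds).foldl (fun T v => (PySem.List.pyRange 0 total_symbols 1).foldl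
            (fun T s => sRow s.toNat
              (rowSp (stateSpec line_n total_lines v_bounds i value p q v) s.toNat) T) T) transition_table)
        · apply PySem.List.foldl_congr_mem
          intro acc v hv
          have hS := hSnn v hv
          dsimp only [stateSpec, rowSp]
          rw [multiToState_shift line_n 0, multiToState_shift line_n 1,
            multiToState_shift (line_n + 1) 0, multiToState_shift (p - 1) 0,
            multiToState_shift (p - 1) 1, multiToState_shift q 0, multiToState_shift p 0]
          set S := multiToState 0 0 v total_lines v_bounds with hSdef
          cases hcond : (PySem.List.pyGetD v i 0 == value) with
          | true =>
            simp only [if_true]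
            rw [nested_eq_single _ _ _ _ _ _ (by omega) (by omega) (by omega) (by omega)
              (by omega) (by omega) (by omega) (by omega) (by omega) total_symbols acc]
            apply PySem.List.foldl_congr_mem
            intro acc2 s hs
            have hs0 : 0 ≤ s := (PySem.List.mem_pyRange_one.mp hs).1
            exact quad_row acc2 s _ _ _ _ _ _ hs0 (by omega) (by omega) (by omega) (by omega)
          | false =>
            simp only [Bool.false_eq_true, if_false]
            rw [nested_eq_single _ _ _ _ _ _ (by omega) (by omega) (by omega) (by omega)
              (by omega) (by omega) (by omega) (by omega) (by omega) total_symbols acc]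
            apply PySem.List.foldl_congr_mem
            intro acc2 s hs
            have hs0 : 0 ≤ s := (PySem.List.mem_pyRange_one.mp hs).1
            exact quad_row acc2 s _ _ _ _ _ _ hs0 (by omega) (by omega) (by omega) (by omega)
        -- Step II: interchange the v_values loop with the symbol loop (distinct rows commute)
        trans ((PySem.List.pyRange 0 total_symbols 1).foldl (fun T s => (allVValues v_bounds).foldl
            (fun T v => sRow s.toNat
              (rowSp (stateSpec line_n total_lines v_bounds i value p q v) s.toNat) T) T) transition_table)
        · apply foldl_interchange
          · intro v _ v' _ s hs t ht hne X
            have hs0 : 0 ≤ s := (PySem.List.mem_pyRange_one.mp hs).1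
            have ht0 : 0 ≤ t := (PySem.List.mem_pyRange_one.mp ht).1
            exact sRow_comm _ _ _ _ (by omega) X
          · exact PySem.List.nodup_pyRange_one 0 total_symbols
        -- Step III: fuse all writes to one row into a single row rebuild
        trans ((PySem.List.pyRange 0 total_symbols 1).foldl (fun T s => sRow s.toNat
            (fun r => (allVValues v_bounds).foldl
              (fun r v => rowSp (stateSpec line_n total_lines v_bounds i value p q v) s.toNat r) r) T)
            transition_table)
        · apply PySem.List.foldl_congr_mem
          intro acc s _
          exact foldl_sRow s.toNat
            (fun v r => rowSp (stateSpec line_n total_lines v_bounds i value p q v) s.toNat r)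
            (allVValues v_bounds) acc hVs
        -- Step IV: a left-to-right pass over the rows is exactly B's enumerate-map
        trans ((PySem.List.enumerate transition_table 0).map (fun sr =>
            if sr.1 < total_symbols then
              (allVValues v_bounds).foldl
                (fun r v => rowSp (stateSpec line_n total_lines v_bounds i value p q v) sr.1.toNat r) sr.2
            else sr.2))
        · exact range_eq_enumMap total_symbols
            (fun jj r => (allVValues v_bounds).foldl
              (fun r v => rowSp (stateSpec line_n total_lines v_bounds i value p q v) jj r) r)
            transition_table
        -- Step V: B's fillRow over the spec list is that per-row fold
        apply List.map_congr_left
        intro sr hsr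
        obtain ⟨k, hk, rfl⟩ := (PySem.List.mem_enumerate_iff _ _ _).mp hsr
        simp only [zero_add, Int.toNat_natCast]
        by_cases hc : (k : Int) < total_symbols
        · rw [if_pos hc, if_pos hc, fillRow, List.foldl_map]
          apply PySem.List.foldl_congr_mem
          intro r v hv
          have hS := hSnn v hv
          dsimp only [stateSpec, rowSp, rowWr]
          rw [multiToState_shift line_n 0, multiToState_shift line_n 1,
            multiToState_shift (p - 1) 0, multiToState_shift (p - 1) 1]
          set S := multiToState 0 0 v total_lines v_bounds with hSdef
          rw [PySem.List.pySetD_of_nonneg _ _ (by omega : (0:Int) ≤ line_n + 0 * total_lines + S),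
            PySem.List.pySetD_of_nonneg _ _ (by omega : (0:Int) ≤ p - 1 + 0 * total_lines + S),
            PySem.List.pySetD_of_nonneg _ _ (by omega : (0:Int) ≤ line_n + 1 * total_lines + S),
            PySem.List.pySetD_of_nonneg _ _ (by omega : (0:Int) ≤ p - 1 + 1 * total_lines + S)]
        · rw [if_neg hc, if_neg hc]

-- ===== VERDICT (by name: the statement is the Claim_ definition above) =====
theorem add_if_variable_spec : Claim_equal_add_if_variable := by
  intro transition_table line_n total_symbols total_lines v_bounds i value p q _ hpre
  unfold Spec_add_if_variable
  exact main_eq transition_table line_n total_symbols total_lines v_bounds i value p q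
    hpre.1 hpre.2
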